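-- pv_equiv track=rewrite | github.com/Jia-520-only/NagaAgent-Custom-Modded-Version | Undefined/src/Undefined/webui/utils/comment.py | _normalize_comment_buffer
-- ===== SOURCE A (Python) =====
-- def _normalize_comment_buffer(buffer: list[str]) -> dict[str, str]:
--     if not buffer:
--         return {}
--     parts: dict[str, list[str]] = {}
--     for item in buffer:
--         lower = item.lower()
--         if lower.startswith("zh:"):
--             parts.setdefault("zh", []).append(item[3:].strip())
--         elif lower.startswith("en:"):
--             parts.setdefault("en", []).append(item[3:].strip())
--         else:
--             parts.setdefault("default", []).append(item)
--     default = " ".join(parts.get("default", [])).strip()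
--     zh_value = " ".join(parts.get("zh", [])).strip()
--     en_value = " ".join(parts.get("en", [])).strip()
--     result: dict[str, str] = {}
--     if zh_value:
--         result["zh"] = zh_value
--     if en_value:
--         result["en"] = en_value
--     if default:
--         result.setdefault("zh", default)
--         result.setdefault("en", default)
--     return result
-- ===== SOURCE B (Python) =====
-- def _normalize_comment_buffer(buffer: list[str]) -> dict[str, str]:
--     zh_value = " ".join(i[3:].strip() for i in buffer if i.lower().startswith("zh:")).strip()
--     en_value = " ".join(i[3:].strip() for i in buffer if i.lower().startswith("en:")).strip()
--     default = " ".join(i for i in buffer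
--                        if not (i.lower().startswith("zh:") or i.lower().startswith("en:"))).strip()
--     pairs = []
--     if zh_value:
--         pairs.append(("zh", zh_value))
--     if en_value:
--         pairs.append(("en", en_value))
--     if default:
--         if not zh_value:
--             pairs.append(("zh", default))
--         if not en_value:
--             pairs.append(("en", default))
--     return dict(pairs)
-- ===== Notes on version B (the rewrite author's own statement) =====
-- stated objective: simpler
-- what changed: Replaces the dict-of-lists accumulator built by one classifying if/elif/else pass with three independent filtered joins over the buffer and a flat pair-list assembly of the result.
import Mathlib
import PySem

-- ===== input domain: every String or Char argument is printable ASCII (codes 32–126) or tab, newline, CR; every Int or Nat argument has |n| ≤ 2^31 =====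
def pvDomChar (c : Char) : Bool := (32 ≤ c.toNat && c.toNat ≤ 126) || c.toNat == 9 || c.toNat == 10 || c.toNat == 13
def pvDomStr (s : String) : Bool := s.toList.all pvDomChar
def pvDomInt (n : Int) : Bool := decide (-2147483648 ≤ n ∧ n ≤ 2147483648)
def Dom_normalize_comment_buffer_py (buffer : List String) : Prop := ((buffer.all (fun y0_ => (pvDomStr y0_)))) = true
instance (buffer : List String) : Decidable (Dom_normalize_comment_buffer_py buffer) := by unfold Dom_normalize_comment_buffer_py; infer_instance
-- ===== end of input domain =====

-- B drops A's dict-of-lists classifying pass: each of the three values is computed by its own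
-- filtered join over the buffer, and the result is assembled as a flat pair list (objective: simpler).

-- ===== PORT A =====
-- the loop body of A, A-side helper: the body of the classifying for-loop
def pvStepA (parts : PySem.Dict String (List String)) (item : String) : PySem.Dict String (List String) :=
  let lower := PySem.Str.lower item
  if PySem.Str.startswith lower "zh:" then
    parts.modify "zh" [] (· ++ [PySem.Str.strip (PySem.Str.slice item (some 3) none)])
  else if PySem.Str.startswith lower "en:" then
    parts.modify "en" [] (· ++ [PySem.Str.strip (PySem.Str.slice item (some 3) none)])
  else
    parts.modify "default" [] (· ++ [item])

def normalize_comment_buffer_py (buffer : List String) : List (String × String) :=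
  if buffer = [] then []
  else
    let parts : PySem.Dict String (List String) :=
      buffer.foldl pvStepA PySem.Dict.empty
    let default := PySem.Str.strip (PySem.Str.join " " (parts.getD "default" []))
    let zh_value := PySem.Str.strip (PySem.Str.join " " (parts.getD "zh" []))
    let en_value := PySem.Str.strip (PySem.Str.join " " (parts.getD "en" []))
    let result : PySem.Dict String String := PySem.Dict.empty
    let result := if zh_value ≠ "" then result.insert "zh" zh_value else result
    let result := if en_value ≠ "" then result.insert "en" en_value else result
    let result := if default ≠ "" then (result.setdefault "zh" default).setdefault "en" default else result
    result.items

-- ===== PORT B =====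
def normalize_comment_buffer_py_alt (buffer : List String) : List (String × String) :=
  let zh_value := PySem.Str.strip (PySem.Str.join " "
    ((buffer.filter (fun i => PySem.Str.startswith (PySem.Str.lower i) "zh:")).map
      (fun i => PySem.Str.strip (PySem.Str.slice i (some 3) none))))
  let en_value := PySem.Str.strip (PySem.Str.join " "
    ((buffer.filter (fun i => PySem.Str.startswith (PySem.Str.lower i) "en:")).map
      (fun i => PySem.Str.strip (PySem.Str.slice i (some 3) none))))
  let default := PySem.Str.strip (PySem.Str.join " "
    (buffer.filter (fun i =>
      !(PySem.Str.startswith (PySem.Str.lower i) "zh:" || PySem.Str.startswith (PySem.Str.lower i) "en:"))))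
  let pairs : List (String × String) := []
  let pairs := if zh_value ≠ "" then pairs ++ [("zh", zh_value)] else pairs
  let pairs := if en_value ≠ "" then pairs ++ [("en", en_value)] else pairs
  let pairs :=
    if default ≠ "" then
      let pairs := if zh_value = "" then pairs ++ [("zh", default)] else pairs
      if en_value = "" then pairs ++ [("en", default)] else pairs
    else pairs
  (PySem.Dict.ofList pairs).items

-- ===== PRECONDITION & SPEC =====
def Spec_normalize_comment_buffer_py (buffer : List String) (out : List (String × String)) : Prop := out = normalize_comment_buffer_py_alt buffer
instance (buffer : List String) (out : List (String × String)) : Decidable (Spec_normalize_comment_buffer_py buffer out) := by unfold Spec_normalize_comment_buffer_py; infer_instance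

-- ===== CLAIM (what is proved, stated in full; the proofs are below) =====
def Claim_equal_normalize_comment_buffer_py : Prop := ∀ (buffer : List String), Dom_normalize_comment_buffer_py buffer → Spec_normalize_comment_buffer_py buffer (normalize_comment_buffer_py buffer)

-- ===== LEMMAS AND PROOFS =====

theorem pvFold_getD_zh (l : List String) (d : PySem.Dict String (List String)) :
    (l.foldl pvStepA d).getD "zh" [] =
      d.getD "zh" [] ++ (l.filter (fun i => PySem.Str.startswith (PySem.Str.lower i) "zh:")).map
        (fun i => PySem.Str.strip (PySem.Str.slice i (some 3) none)) := by
  induction l generalizing d with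
  | nil => simp
  | cons x xs ih =>
    simp only [List.foldl_cons, List.filter_cons, ih, pvStepA]
    split_ifs with h1 h2 <;>
      simp_all [PySem.Dict.getD_modify]
  

theorem pvNotBoth (l : List Char) :
    PySem.Chars.startswith l ['z', 'h', ':'] = true →
    PySem.Chars.startswith l ['e', 'n', ':'] = true → False := by
  intro h1 h2
  obtain ⟨t1, e1⟩ := (PySem.Chars.startswith_iff l _).mp h1
  obtain ⟨t2, e2⟩ := (PySem.Chars.startswith_iff l _).mp h2
  rw [← e1] at e2
  simp at e2

theorem pvFold_getD_en (l : List String) (d : PySem.Dict String (List String)) :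
    (l.foldl pvStepA d).getD "en" [] =
      d.getD "en" [] ++ (l.filter (fun i => PySem.Str.startswith (PySem.Str.lower i) "en:")).map
        (fun i => PySem.Str.strip (PySem.Str.slice i (some 3) none)) := by
  induction l generalizing d with
  | nil => simp
  | cons x xs ih =>
    simp only [List.foldl_cons, List.filter_cons, ih, pvStepA]
    split_ifs with h1 h2 <;>
      simp_all [PySem.Dict.getD_modify] <;>
      exact pvNotBoth _ h1 h2

theorem pvFold_getD_default (l : List String) (d : PySem.Dict String (List String)) :
    (l.foldl pvStepA d).getD "default" [] =
      d.getD "default" [] ++ l.filter (fun i =>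
        !(PySem.Str.startswith (PySem.Str.lower i) "zh:" || PySem.Str.startswith (PySem.Str.lower i) "en:")) := by
  induction l generalizing d with
  | nil => simp
  | cons x xs ih =>
    simp only [List.foldl_cons, List.filter_cons, ih, pvStepA]
    split_ifs with h1 h2 <;>
      simp_all [PySem.Dict.getD_modify]

-- the two final assembly blocks produce the same items list, for any three values
theorem pvAssembly (z e dft : String) :
    (let result : PySem.Dict String String := PySem.Dict.empty
     let result := if z ≠ "" then result.insert "zh" z else result
     let result := if e ≠ "" then result.insert "en" e else result
     let result := if dft ≠ "" then (result.setdefault "zh" dft).setdefault "en" dft else result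
     result.items) =
    (let pairs : List (String × String) := []
     let pairs := if z ≠ "" then pairs ++ [("zh", z)] else pairs
     let pairs := if e ≠ "" then pairs ++ [("en", e)] else pairs
     let pairs :=
       if dft ≠ "" then
         let pairs := if z = "" then pairs ++ [("zh", dft)] else pairs
         if e = "" then pairs ++ [("en", dft)] else pairs
       else pairs
     (PySem.Dict.ofList pairs).items) := by
  by_cases hz : z = "" <;> by_cases he : e = "" <;> by_cases hd : dft = "" <;>
    simp [hz, he, hd, PySem.Dict.empty, PySem.Dict.insert, PySem.Dict.setdefault,
      PySem.Dict.ofList, PySem.Dict.contains, PySem.Dict.update]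

-- ===== VERDICT (by name: the statement is the Claim_ definition above) =====
theorem normalize_comment_buffer_py_spec : Claim_equal_normalize_comment_buffer_py := by
  intro buffer _
  show normalize_comment_buffer_py buffer = normalize_comment_buffer_py_alt buffer
  by_cases hb : buffer = []
  · subst hb; rfl
  · simp only [normalize_comment_buffer_py, normalize_comment_buffer_py_alt, if_neg hb]
    have hz := pvFold_getD_zh buffer PySem.Dict.empty
    have he := pvFold_getD_en buffer PySem.Dict.empty
    have hd := pvFold_getD_default buffer PySem.Dict.empty
    simp only [PySem.Dict.getD_empty, List.nil_append] at hz he hd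
    rw [hz, he, hd]
    exact pvAssembly _ _ _
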